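-- pv_equiv track=rewrite | github.com/BioGeMT/ParaDISM | giab_benchmark/make_benchmark_gene_coords_bed.py | map_chr16_to_gene_coords
-- ===== SOURCE A (Python) =====
-- GENE_COORDS: dict[str, tuple[int, int]] = {
--     "PKD1": (2088707, 2135898),
--     "PKD1P1": (16310133, 16334190),
--     "PKD1P2": (16356223, 16377507),
--     "PKD1P3": (14911550, 14935708),
--     "PKD1P4": (18334399, 18352476),
--     "PKD1P5": (18374520, 18402014),
--     "PKD1P6": (15125138, 15154873),
-- }
--
-- def merge_intervals(intervals: list[tuple[int, int]]) -> list[tuple[int, int]]: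
--     if not intervals:
--         return []
--     intervals.sort()
--     merged: list[tuple[int, int]] = []
--     cur_start, cur_end = intervals[0]
--     for start, end in intervals[1:]:
--         if start > cur_end:
--             merged.append((cur_start, cur_end))
--             cur_start, cur_end = start, end
--         else:
--             cur_end = max(cur_end, end)
--     merged.append((cur_start, cur_end))
--     return merged
--
-- def map_chr16_to_gene_coords(
--     chr16_intervals: list[tuple[int, int]],
-- ) -> dict[str, list[tuple[int, int]]]:
--     out: dict[str, list[tuple[int, int]]] = {gene: [] for gene in GENE_COORDS}
--     for gene, (gene_start_1based, gene_end_1based) in GENE_COORDS.items():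
--         gene_start0 = gene_start_1based - 1
--         gene_end0 = gene_end_1based  # inclusive -> end-exclusive in 0-based
--
--         mapped: list[tuple[int, int]] = []
--         for start0, end0 in chr16_intervals:
--             overlap_start0 = max(start0, gene_start0)
--             overlap_end0 = min(end0, gene_end0)
--             if overlap_end0 <= overlap_start0:
--                 continue
--
--             gene_rel_start0 = overlap_start0 - gene_start0
--             gene_rel_end0 = overlap_end0 - gene_start0
--             mapped.append((gene_rel_start0, gene_rel_end0))
--
--         out[gene] = merge_intervals(mapped)
--     return out
-- ===== SOURCE B (Python) =====
-- GENE_COORDS: dict[str, tuple[int, int]] = {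
--     "PKD1": (2088707, 2135898),
--     "PKD1P1": (16310133, 16334190),
--     "PKD1P2": (16356223, 16377507),
--     "PKD1P3": (14911550, 14935708),
--     "PKD1P4": (18334399, 18352476),
--     "PKD1P5": (18374520, 18402014),
--     "PKD1P6": (15125138, 15154873),
-- }
--
-- def map_chr16_to_gene_coords(
--     chr16_intervals: list[tuple[int, int]],
-- ) -> dict[str, list[tuple[int, int]]]:
--     # Merge once up front; the merged list is sorted and gap-separated, so
--     # clipping it to each gene window needs no per-gene re-merge.
--     merged: list[tuple[int, int]] = []
--     for s, e in sorted(chr16_intervals):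
--         if merged and s <= merged[-1][1]:
--             ps, pe = merged[-1]
--             merged[-1] = (ps, max(pe, e))
--         else:
--             merged.append((s, e))
--     out: dict[str, list[tuple[int, int]]] = {}
--     for gene, (gene_start_1based, gene_end_1based) in GENE_COORDS.items():
--         g0, g1 = gene_start_1based - 1, gene_end_1based
--         out[gene] = [
--             (max(s, g0) - g0, min(e, g1) - g0)
--             for s, e in merged
--             if max(s, g0) < min(e, g1)
--         ]
--     return out
-- ===== Notes on version B (the rewrite author's own statement) =====
-- stated objective: alternative
-- what changed: B sorts and merges the chromosome intervals once up front, then for each gene only clips the already merged, gap-separated list to the gene window with a comprehension, instead of A's per-gene clip-then-sort-then-merge pass (seven sorts and merges replaced by one).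
import Mathlib
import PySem

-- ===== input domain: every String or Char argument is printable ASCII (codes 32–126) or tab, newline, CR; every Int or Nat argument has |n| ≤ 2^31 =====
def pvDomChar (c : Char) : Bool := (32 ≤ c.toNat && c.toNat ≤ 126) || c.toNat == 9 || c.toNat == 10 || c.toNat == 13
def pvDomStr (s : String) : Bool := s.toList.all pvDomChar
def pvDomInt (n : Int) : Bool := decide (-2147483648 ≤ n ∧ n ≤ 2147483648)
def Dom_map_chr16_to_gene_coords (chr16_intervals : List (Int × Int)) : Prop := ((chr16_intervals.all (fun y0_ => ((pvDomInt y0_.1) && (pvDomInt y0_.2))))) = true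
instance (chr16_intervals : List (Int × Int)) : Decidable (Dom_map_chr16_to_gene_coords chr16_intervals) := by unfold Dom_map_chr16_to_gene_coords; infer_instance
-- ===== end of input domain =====

-- B merges the intervals ONCE up front (one sort instead of seven) and only clips the
-- merged, gap-separated list to each gene window, so no per-gene re-merge is needed.

-- ===== PORT A =====
def geneCoords : List (String × (Int × Int)) :=
  [("PKD1", (2088707, 2135898)), ("PKD1P1", (16310133, 16334190)),
   ("PKD1P2", (16356223, 16377507)), ("PKD1P3", (14911550, 14935708)),
   ("PKD1P4", (18334399, 18352476)), ("PKD1P5", (18374520, 18402014)),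
   ("PKD1P6", (15125138, 15154873))]

-- the 'for start, end in intervals[1:]' loop of merge_intervals
def mergeLoopA (cur : Int × Int) (rest : List (Int × Int)) (merged : List (Int × Int)) :
    List (Int × Int) :=
  match rest with
  | [] => merged ++ [cur]
  | q :: t =>
    if q.1 > cur.2 then mergeLoopA (q.1, q.2) t (merged ++ [cur])
    else mergeLoopA (cur.1, max cur.2 q.2) t merged

def merge_intervals (intervals : List (Int × Int)) : List (Int × Int) :=
  if intervals = [] then []
  else
    match PySem.List.sorted2 intervals Prod.fst Prod.snd with
    | [] => []      -- unreachable: sorted2 of a nonempty list is nonempty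
    | c :: rest => mergeLoopA c rest []

-- the 'for start0, end0 in chr16_intervals' loop of A, for one gene window
def mappedFor (g0 g1 : Int) (xs : List (Int × Int)) : List (Int × Int) :=
  xs.foldl (fun mapped q =>
    if min q.2 g1 ≤ max q.1 g0 then mapped
    else mapped ++ [(max q.1 g0 - g0, min q.2 g1 - g0)]) []

def map_chr16_to_gene_coords (chr16_intervals : List (Int × Int)) :
    List (String × List (Int × Int)) :=
  let out0 : PySem.Dict String (List (Int × Int)) :=
    geneCoords.foldl (fun d g => d.insert g.1 []) PySem.Dict.empty
  (geneCoords.foldl (fun d g =>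
    d.insert g.1 (merge_intervals (mappedFor (g.2.1 - 1) g.2.2 chr16_intervals))) out0).items

-- ===== PORT B =====
def mergeB (xs : List (Int × Int)) : List (Int × Int) :=
  (PySem.List.sorted2 xs Prod.fst Prod.snd).foldl
    (fun merged q =>
      match merged.getLast? with
      | some last =>
        if q.1 ≤ last.2 then merged.dropLast ++ [(last.1, max last.2 q.2)]
        else merged ++ [q]
      | none => merged ++ [q]) []

-- the per-gene list comprehension of B
def clipG (g0 g1 : Int) (merged : List (Int × Int)) : List (Int × Int) :=
  (merged.filter (fun q => max q.1 g0 < min q.2 g1)).map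
    (fun q => (max q.1 g0 - g0, min q.2 g1 - g0))

def map_chr16_to_gene_coords_alt (chr16_intervals : List (Int × Int)) :
    List (String × List (Int × Int)) :=
  let merged := mergeB chr16_intervals
  (geneCoords.foldl (fun d g =>
    d.insert g.1 (clipG (g.2.1 - 1) g.2.2 merged))
    (PySem.Dict.empty : PySem.Dict String (List (Int × Int)))).items

-- ===== PRECONDITION & SPEC =====
def Spec_map_chr16_to_gene_coords (chr16_intervals : List (Int × Int)) (out : List (String × List (Int × Int))) : Prop := out = map_chr16_to_gene_coords_alt chr16_intervals
instance (chr16_intervals : List (Int × Int)) (out : List (String × List (Int × Int))) : Decidable (Spec_map_chr16_to_gene_coords chr16_intervals out) := by unfold Spec_map_chr16_to_gene_coords; infer_instance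

-- ===== CLAIM (what is proved, stated in full; the proofs are below) =====
def Claim_equal_map_chr16_to_gene_coords : Prop := ∀ (chr16_intervals : List (Int × Int)), Dom_map_chr16_to_gene_coords chr16_intervals → Spec_map_chr16_to_gene_coords chr16_intervals (map_chr16_to_gene_coords chr16_intervals)

-- ===== LEMMAS AND PROOFS =====

-- a single reference recursion both merge loops reduce to
def mergeRun (s e : Int) : List (Int × Int) → List (Int × Int)
  | [] => [(s, e)]
  | q :: t => if q.1 ≤ e then mergeRun s (max e q.2) t else (s, e) :: mergeRun q.1 q.2 t

def mrg (Z : List (Int × Int)) : List (Int × Int) :=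
  match PySem.List.sorted2 Z Prod.fst Prod.snd with
  | [] => []
  | c :: rest => mergeRun c.1 c.2 rest

-- the set of points covered by a list of half-open intervals
def cov (L : List (Int × Int)) (p : Int) : Prop := ∃ q ∈ L, q.1 ≤ p ∧ p < q.2

-- intervals in output order: separated by a positive gap / nondecreasing starts
def gapR (a b : Int × Int) : Prop := a.2 < b.1
def R2 (a b : Int × Int) : Prop := a.2 < b.1 ∧ a.1 ≤ b.1
def fstle (a b : Int × Int) : Prop := a.1 ≤ b.1

theorem cov_nil (p : Int) : ¬ cov [] p := by simp [cov]

theorem cov_cons (a : Int × Int) (L : List (Int × Int)) (p : Int) :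
    cov (a :: L) p ↔ (a.1 ≤ p ∧ p < a.2) ∨ cov L p := by
  simp [cov]

theorem cov_perm {L M : List (Int × Int)} (h : L.Perm M) (p : Int) : cov L p ↔ cov M p := by
  unfold cov
  constructor <;> rintro ⟨q, hq, hp⟩
  · exact ⟨q, h.mem_iff.1 hq, hp⟩
  · exact ⟨q, h.mem_iff.2 hq, hp⟩

-- sorted2 with the tuple comparator has nondecreasing first components
theorem insertBy_pairwise_fstle (x : Int × Int) (ys : List (Int × Int))
    (h : List.Pairwise fstle ys) :
    List.Pairwise fstle (PySem.List.insertBy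
      (fun a b => decide (a.1 < b.1) || (!decide (b.1 < a.1) && decide (a.2 < b.2))) x ys) := by
  induction ys with
  | nil => simp [PySem.List.insertBy]
  | cons y ys ih =>
    rw [List.pairwise_cons] at h
    simp only [PySem.List.insertBy]
    split
    · rename_i hb
      refine List.pairwise_cons.2 ⟨?_, List.pairwise_cons.2 ⟨h.1, h.2⟩⟩
      intro z hz
      rcases List.mem_cons.1 hz with hz | hz
      · subst hz
        simp only [Bool.or_eq_true, Bool.and_eq_true, decide_eq_true_eq, Bool.not_eq_true',
          decide_eq_false_iff_not] at hb
        unfold fstle; omega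
      · have := h.1 z hz
        simp only [Bool.or_eq_true, Bool.and_eq_true, decide_eq_true_eq, Bool.not_eq_true',
          decide_eq_false_iff_not] at hb
        unfold fstle at this ⊢; omega
    · rename_i hb
      refine List.pairwise_cons.2 ⟨?_, ih h.2⟩
      intro z hz
      rw [PySem.List.insertBy_mem_iff] at hz
      rcases hz with hz | hz
      · subst hz
        simp only [Bool.or_eq_true, Bool.and_eq_true, decide_eq_true_eq, Bool.not_eq_true',
          decide_eq_false_iff_not, not_or, not_and] at hb
        unfold fstle; omega
      · exact h.1 z hz

theorem sorted2_pairwise_fstle (Z : List (Int × Int)) :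
    List.Pairwise fstle (PySem.List.sorted2 Z Prod.fst Prod.snd) := by
  show List.Pairwise fstle (Z.foldl (fun acc x => PySem.List.insertBy _ x acc) [])
  generalize hacc : ([] : List (Int × Int)) = acc
  have hp : List.Pairwise fstle acc := by subst hacc; simp
  clear hacc
  induction Z generalizing acc with
  | nil => exact hp
  | cons z Z ih => exact ih _ (insertBy_pairwise_fstle z acc hp)

-- both Python merge loops compute mergeRun
theorem mergeLoopA_eq (rest : List (Int × Int)) :
    ∀ (cur : Int × Int) (acc : List (Int × Int)),
      mergeLoopA cur rest acc = acc ++ mergeRun cur.1 cur.2 rest := by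
  induction rest with
  | nil => intro cur acc; simp [mergeLoopA, mergeRun]
  | cons q t ih =>
    intro cur acc
    simp only [mergeLoopA, mergeRun]
    by_cases h : q.1 ≤ cur.2
    · rw [if_neg (by omega), if_pos h, ih]
    · rw [if_pos (by omega), if_neg h, ih]
      simp

theorem mergeBfold_eq (rest : List (Int × Int)) :
    ∀ (s e : Int) (init : List (Int × Int)),
      (rest.foldl (fun merged q =>
        match merged.getLast? with
        | some last =>
          if q.1 ≤ last.2 then merged.dropLast ++ [(last.1, max last.2 q.2)]
          else merged ++ [q]
        | none => merged ++ [q]) (init ++ [(s, e)]))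
      = init ++ mergeRun s e rest := by
  induction rest with
  | nil => intro s e init; simp [mergeRun]
  | cons q t ih =>
    intro s e init
    simp only [List.foldl_cons, List.getLast?_concat, List.dropLast_concat, mergeRun]
    by_cases h : q.1 ≤ e
    · simp only [if_pos h]
      exact ih s (max e q.2) init
    · simp only [if_neg h]
      have h2 : init ++ [(s, e)] ++ [q] = (init ++ [(s, e)]) ++ [(q.1, q.2)] := by simp
      rw [h2, ih]
      simp

theorem mergeA_eq_mrg (Z : List (Int × Int)) : merge_intervals Z = mrg Z := by
  unfold merge_intervals mrg
  by_cases h : Z = []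
  · subst h; simp [PySem.List.sorted2]
  · rw [if_neg h]
    cases hs : PySem.List.sorted2 Z Prod.fst Prod.snd with
    | nil => rfl
    | cons c rest =>
      show mergeLoopA c rest [] = mergeRun c.1 c.2 rest
      rw [mergeLoopA_eq]; rfl

theorem mergeB_eq_mrg (Z : List (Int × Int)) : mergeB Z = mrg Z := by
  unfold mergeB mrg
  cases hs : PySem.List.sorted2 Z Prod.fst Prod.snd with
  | nil => rfl
  | cons c rest =>
    simp only [List.foldl_cons, List.getLast?_nil]
    have h0 : ([] : List (Int × Int)) ++ [(c.1, c.2)] = [c] := by simp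
    rw [show ([] : List (Int × Int)) ++ [c] = [] ++ [(c.1, c.2)] by simp,
      mergeBfold_eq rest c.1 c.2 []]
    simp

-- mergeRun facts, under nondecreasing starts
theorem cov_mergeRun (rest : List (Int × Int)) :
    ∀ s e : Int, List.Pairwise fstle ((s, e) :: rest) →
      ∀ p, cov (mergeRun s e rest) p ↔ (s ≤ p ∧ p < e) ∨ cov rest p := by
  induction rest with
  | nil => intro s e _ p; simp [mergeRun, cov_cons, cov_nil]
  | cons q t ih =>
    intro s e hpw p
    rw [List.pairwise_cons] at hpw
    have hq : s ≤ q.1 := hpw.1 q (by simp)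
    simp only [mergeRun]
    by_cases h : q.1 ≤ e
    · rw [if_pos h]
      have hpw' : List.Pairwise fstle ((s, max e q.2) :: t) := by
        rw [List.pairwise_cons]
        exact ⟨fun z hz => hpw.1 z (by simp [hz]), hpw.2.tail⟩
      rw [ih s (max e q.2) hpw' p, cov_cons]
      constructor
      · rintro (hc | hc)
        · by_cases hp : p < e
          · exact Or.inl ⟨hc.1, hp⟩
          · exact Or.inr (Or.inl ⟨by omega, by omega⟩)
        · exact Or.inr (Or.inr hc)
      · rintro (hc | hc | hc)
        · exact Or.inl ⟨hc.1, by omega⟩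
        · exact Or.inl ⟨by omega, by omega⟩
        · exact Or.inr hc
    · rw [if_neg h, cov_cons, ih q.1 q.2 (List.pairwise_cons.2 ⟨fun z hz => ((List.pairwise_cons.1 hpw.2).1 z hz : fstle q z), (List.pairwise_cons.1 hpw.2).2⟩) p, cov_cons]

theorem head_mergeRun (rest : List (Int × Int)) :
    ∀ s e : Int, ∃ e' t', mergeRun s e rest = (s, e') :: t' := by
  induction rest with
  | nil => intro s e; exact ⟨e, [], rfl⟩
  | cons q t ih =>
    intro s e
    simp only [mergeRun]
    by_cases h : q.1 ≤ e
    · rw [if_pos h]; exact ih s (max e q.2)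
    · rw [if_neg h]; exact ⟨e, _, rfl⟩

theorem chain_mergeRun (rest : List (Int × Int)) :
    ∀ s e : Int, List.Pairwise fstle ((s, e) :: rest) →
      List.IsChain R2 (mergeRun s e rest) := by
  induction rest with
  | nil => intro s e _; simp [mergeRun]
  | cons q t ih =>
    intro s e hpw
    rw [List.pairwise_cons] at hpw
    have hq : s ≤ q.1 := hpw.1 q (by simp)
    simp only [mergeRun]
    by_cases h : q.1 ≤ e
    · rw [if_pos h]
      exact ih s (max e q.2) (List.pairwise_cons.2 ⟨fun z hz => hpw.1 z (by simp [hz]), hpw.2.tail⟩)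
    · rw [if_neg h]
      have hpw' : List.Pairwise fstle ((q.1, q.2) :: t) := by
        rw [List.pairwise_cons]
        exact ⟨fun z hz => ((List.pairwise_cons.1 hpw.2).1 z hz : fstle q z), (List.pairwise_cons.1 hpw.2).2⟩
      obtain ⟨e', t', heq⟩ := head_mergeRun t q.1 q.2
      rw [heq]
      refine List.isChain_cons_cons.2 ⟨⟨by omega, hq⟩, ?_⟩
      rw [← heq]
      exact ih q.1 q.2 hpw'

theorem nondeg_mergeRun (rest : List (Int × Int)) :
    ∀ s e : Int, (∀ q ∈ rest, q.1 < q.2) → s < e →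
      ∀ r ∈ mergeRun s e rest, r.1 < r.2 := by
  induction rest with
  | nil => intro s e _ hse r hr; simp [mergeRun] at hr; subst hr; exact hse
  | cons q t ih =>
    intro s e hnd hse r hr
    simp only [mergeRun] at hr
    by_cases h : q.1 ≤ e
    · rw [if_pos h] at hr
      exact ih s (max e q.2) (fun z hz => hnd z (by simp [hz])) (by omega) r hr
    · rw [if_neg h] at hr
      rcases List.mem_cons.1 hr with hr | hr
      · subst hr; exact hse
      · exact ih q.1 q.2 (fun z hz => hnd z (by simp [hz])) (hnd q (by simp)) r hr

-- Chain' R2 implies Pairwise R2 (R2 is transitive)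
theorem pairwise_R2_of_isChain : ∀ (M : List (Int × Int)), List.IsChain R2 M → List.Pairwise R2 M := by
  intro M h
  induction M with
  | nil => simp
  | cons a t ih =>
    rw [List.isChain_cons] at h
    refine List.pairwise_cons.2 ⟨?_, ih h.2⟩
    intro b hb
    cases t with
    | nil => simp at hb
    | cons c t' =>
      have hac : R2 a c := h.1 c rfl
      rcases List.mem_cons.1 hb with hb | hb
      · subst hb; exact hac
      · have := ih h.2
        rw [List.pairwise_cons] at this
        have hcb : R2 c b := this.1 b hb
        exact ⟨by unfold R2 at *; omega, by unfold R2 at *; omega⟩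

-- the bundled facts about mrg
theorem cov_mrg (Z : List (Int × Int)) (p : Int) : cov (mrg Z) p ↔ cov Z p := by
  unfold mrg
  cases hs : PySem.List.sorted2 Z Prod.fst Prod.snd with
  | nil =>
    have : Z = [] := by
      have := PySem.List.sorted2_perm Z Prod.fst Prod.snd false
      rw [hs] at this
      exact this.symm.eq_nil
    subst this; rfl
  | cons c rest =>
    have hperm : (c :: rest).Perm Z := by
      have := PySem.List.sorted2_perm Z Prod.fst Prod.snd false
      rwa [hs] at this
    have hpw : List.Pairwise fstle (c :: rest) := by
      have := sorted2_pairwise_fstle Z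
      rwa [hs] at this
    show cov (mergeRun c.1 c.2 rest) p ↔ cov Z p
    rw [← cov_perm hperm p, cov_cons]
    exact cov_mergeRun rest c.1 c.2 (by simpa using hpw) p

theorem pw_mrg (Z : List (Int × Int)) : List.Pairwise R2 (mrg Z) := by
  unfold mrg
  cases hs : PySem.List.sorted2 Z Prod.fst Prod.snd with
  | nil => simp
  | cons c rest =>
    have hpw : List.Pairwise fstle (c :: rest) := by
      have := sorted2_pairwise_fstle Z
      rwa [hs] at this
    show List.Pairwise R2 (mergeRun c.1 c.2 rest)
    exact pairwise_R2_of_isChain _ (chain_mergeRun rest c.1 c.2 (by simpa using hpw))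

theorem nondeg_mrg (Z : List (Int × Int)) (h : ∀ q ∈ Z, q.1 < q.2) :
    ∀ r ∈ mrg Z, r.1 < r.2 := by
  unfold mrg
  cases hs : PySem.List.sorted2 Z Prod.fst Prod.snd with
  | nil => simp
  | cons c rest =>
    have hmem : ∀ q ∈ c :: rest, q.1 < q.2 := by
      intro q hq
      apply h
      have := PySem.List.sorted2_perm Z Prod.fst Prod.snd false
      rw [hs] at this
      exact this.mem_iff.1 hq
    show ∀ r ∈ mergeRun c.1 c.2 rest, r.1 < r.2
    exact nondeg_mergeRun rest c.1 c.2 (fun q hq => hmem q (by simp [hq])) (hmem c (by simp))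

-- canonical lists (positive gaps, nondegenerate) with the same cover are equal
theorem canon_unique : ∀ (M N : List (Int × Int)),
    List.Pairwise gapR M → (∀ r ∈ M, r.1 < r.2) →
    List.Pairwise gapR N → (∀ r ∈ N, r.1 < r.2) →
    (∀ p, cov M p ↔ cov N p) → M = N := by
  intro M
  induction M with
  | nil =>
    intro N _ _ _ hndN hcov
    cases N with
    | nil => rfl
    | cons b N' =>
      exfalso
      have : cov (b :: N') b.1 := (cov_cons b N' b.1).2 (Or.inl ⟨le_refl _, hndN b (by simp)⟩)
      exact cov_nil b.1 ((hcov b.1).2 this)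
  | cons a M' ih =>
    intro N hpwM hndM hpwN hndN hcov
    cases N with
    | nil =>
      exfalso
      have : cov (a :: M') a.1 := (cov_cons a M' a.1).2 (Or.inl ⟨le_refl _, hndM a (by simp)⟩)
      exact cov_nil a.1 ((hcov a.1).1 this)
    | cons b N' =>
      rw [List.pairwise_cons] at hpwM hpwN
      have hnda : a.1 < a.2 := hndM a (by simp)
      have hndb : b.1 < b.2 := hndN b (by simp)
      -- first components agree
      have hb1a1 : b.1 ≤ a.1 := by
        have hc : cov (b :: N') a.1 :=
          (hcov a.1).1 ((cov_cons a M' a.1).2 (Or.inl ⟨le_refl _, hnda⟩))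
        rw [cov_cons] at hc
        rcases hc with hc | hc
        · exact hc.1
        · obtain ⟨q, hq, h1, h2⟩ := hc
          have := hpwN.1 q hq
          unfold gapR at this; omega
      have ha1b1 : a.1 ≤ b.1 := by
        have hc : cov (a :: M') b.1 :=
          (hcov b.1).2 ((cov_cons b N' b.1).2 (Or.inl ⟨le_refl _, hndb⟩))
        rw [cov_cons] at hc
        rcases hc with hc | hc
        · exact hc.1
        · obtain ⟨q, hq, h1, h2⟩ := hc
          have := hpwM.1 q hq
          unfold gapR at this; omega
      have h1 : a.1 = b.1 := le_antisymm ha1b1 hb1a1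
      -- second components agree
      have hnlt1 : ¬ a.2 < b.2 := by
        intro hlt
        have hc : cov (a :: M') a.2 :=
          (hcov a.2).2 ((cov_cons b N' a.2).2 (Or.inl ⟨by omega, hlt⟩))
        rw [cov_cons] at hc
        rcases hc with hc | hc
        · omega
        · obtain ⟨q, hq, hq1, hq2⟩ := hc
          have := hpwM.1 q hq
          unfold gapR at this; omega
      have hnlt2 : ¬ b.2 < a.2 := by
        intro hlt
        have hc : cov (b :: N') b.2 :=
          (hcov b.2).1 ((cov_cons a M' b.2).2 (Or.inl ⟨by omega, hlt⟩))
        rw [cov_cons] at hc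
        rcases hc with hc | hc
        · omega
        · obtain ⟨q, hq, hq1, hq2⟩ := hc
          have := hpwN.1 q hq
          unfold gapR at this; omega
      have h2 : a.2 = b.2 := by omega
      -- tails have the same cover
      have hcov' : ∀ p, cov M' p ↔ cov N' p := by
        intro p
        constructor
        · intro hc
          obtain ⟨q, hq, hq1, hq2⟩ := hc
          have hgap := hpwM.1 q hq
          unfold gapR at hgap
          have : cov (b :: N') p := (hcov p).1 ((cov_cons a M' p).2 (Or.inr ⟨q, hq, hq1, hq2⟩))
          rw [cov_cons] at this
          rcases this with hc' | hc'
          · omega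
          · exact hc'
        · intro hc
          obtain ⟨q, hq, hq1, hq2⟩ := hc
          have hgap := hpwN.1 q hq
          unfold gapR at hgap
          have : cov (a :: M') p := (hcov p).2 ((cov_cons b N' p).2 (Or.inr ⟨q, hq, hq1, hq2⟩))
          rw [cov_cons] at this
          rcases this with hc' | hc'
          · omega
          · exact hc'
      have htl : M' = N' := ih N' hpwM.2 (fun r hr => hndM r (by simp [hr]))
        hpwN.2 (fun r hr => hndN r (by simp [hr])) hcov'
      rw [htl, Prod.ext_iff.2 ⟨h1, h2⟩]

-- A's inner clipping loop is a filter-map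
theorem mappedFor_fold (g0 g1 : Int) (xs : List (Int × Int)) :
    ∀ acc, xs.foldl (fun mapped q =>
      if min q.2 g1 ≤ max q.1 g0 then mapped
      else mapped ++ [(max q.1 g0 - g0, min q.2 g1 - g0)]) acc
      = acc ++ clipG g0 g1 xs := by
  induction xs with
  | nil => intro acc; simp [clipG]
  | cons q t ih =>
    intro acc
    simp only [List.foldl_cons, clipG, List.filter_cons]
    by_cases hc : max q.1 g0 < min q.2 g1
    · rw [if_neg (by omega), ih]
      simp [hc, clipG]
    · rw [if_pos (by omega), ih]
      simp [hc, clipG]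

theorem mappedFor_eq (g0 g1 : Int) (xs : List (Int × Int)) :
    mappedFor g0 g1 xs = clipG g0 g1 xs := by
  unfold mappedFor
  simpa using mappedFor_fold g0 g1 xs []

theorem nondeg_clipG (g0 g1 : Int) (L : List (Int × Int)) :
    ∀ r ∈ clipG g0 g1 L, r.1 < r.2 := by
  intro r hr
  simp only [clipG, List.mem_map, List.mem_filter, decide_eq_true_eq] at hr
  obtain ⟨q, ⟨_, hc⟩, hq⟩ := hr
  subst hq; simpa using by omega

theorem pw_clipG (g0 g1 : Int) (L : List (Int × Int)) (h : List.Pairwise R2 L) :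
    List.Pairwise gapR (clipG g0 g1 L) := by
  unfold clipG
  rw [List.pairwise_map]
  refine (h.filter _).imp ?_
  intro a b hab
  unfold R2 at hab
  unfold gapR
  simp only []
  omega

theorem cov_clipG (g0 g1 : Int) (L : List (Int × Int)) (p : Int) :
    cov (clipG g0 g1 L) p ↔ cov L (p + g0) ∧ g0 ≤ p + g0 ∧ p + g0 < g1 := by
  simp only [clipG, cov, List.mem_map, List.mem_filter, decide_eq_true_eq]
  constructor
  · rintro ⟨r, ⟨q, ⟨hq, hc⟩, rfl⟩, h1, h2⟩
    simp only at h1 h2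
    exact ⟨⟨q, hq, by omega⟩, by omega, by omega⟩
  · rintro ⟨⟨q, hq, h⟩, hw1, hw2⟩
    exact ⟨(max q.1 g0 - g0, min q.2 g1 - g0), ⟨q, ⟨hq, by omega⟩, rfl⟩, by omega, by omega⟩

-- per-gene core equality
theorem core_eq (g0 g1 : Int) (X : List (Int × Int)) :
    merge_intervals (mappedFor g0 g1 X) = clipG g0 g1 (mergeB X) := by
  rw [mappedFor_eq, mergeA_eq_mrg, mergeB_eq_mrg]
  apply canon_unique
  · exact (pw_mrg _).imp (fun h => h.1)
  · exact nondeg_mrg _ (nondeg_clipG g0 g1 X)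
  · exact pw_clipG g0 g1 _ (pw_mrg X)
  · exact nondeg_clipG g0 g1 _
  · intro p
    rw [cov_mrg, cov_clipG, cov_clipG, cov_mrg]

-- ===== VERDICT (by name: the statement is the Claim_ definition above) =====
theorem map_chr16_to_gene_coords_spec : Claim_equal_map_chr16_to_gene_coords := by
  intro X _
  unfold Spec_map_chr16_to_gene_coords
  unfold map_chr16_to_gene_coords map_chr16_to_gene_coords_alt
  simp [geneCoords, PySem.Dict.insert, PySem.Dict.empty, PySem.Dict.contains, core_eq]
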